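-- pv_equiv track=rewrite | github.com/jir682/PDC | PDC.py | le_bruhat
-- ===== SOURCE A (Python) =====
-- def le_bruhat(x,y):
--     for i in range(len(x) - 1):
--         a = list(x[:i + 1])
--         b = list(y[:i + 1])
--         a.sort()
--         b.sort()
--         if not le_indexed(a,b):
--             return False
--     return True
--
-- def le_indexed(a,b):
--     for i in range(len(a)):
--         if a[i] > b[i]:
--             return False
--     return True
-- ===== SOURCE B (Python) =====
-- def le_bruhat(x, y):
--     a = []
--     b = []
--     for i in range(len(x) - 1):
--         _insort(a, x[i])
--         _insort(b, y[i])
--         if any(p > q for p, q in zip(a, b)):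
--             return False
--     return True
--
-- def _insort(lst, v):
--     i = 0
--     while i < len(lst) and lst[i] <= v:
--         i += 1
--     lst.insert(i, v)
-- ===== Notes on version B (the rewrite author's own statement) =====
-- stated objective: alternative
-- what changed: B maintains the two sorted prefixes incrementally by inserting each new element into an already-sorted accumulator, instead of re-slicing and re-sorting both prefixes from scratch at every step; the domination check becomes an any-over-zip of the accumulators.
-- outside the precondition, e.g. on le_bruhat([9, 0, 0], [5]): A returns False, B returns False
import Mathlib
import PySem

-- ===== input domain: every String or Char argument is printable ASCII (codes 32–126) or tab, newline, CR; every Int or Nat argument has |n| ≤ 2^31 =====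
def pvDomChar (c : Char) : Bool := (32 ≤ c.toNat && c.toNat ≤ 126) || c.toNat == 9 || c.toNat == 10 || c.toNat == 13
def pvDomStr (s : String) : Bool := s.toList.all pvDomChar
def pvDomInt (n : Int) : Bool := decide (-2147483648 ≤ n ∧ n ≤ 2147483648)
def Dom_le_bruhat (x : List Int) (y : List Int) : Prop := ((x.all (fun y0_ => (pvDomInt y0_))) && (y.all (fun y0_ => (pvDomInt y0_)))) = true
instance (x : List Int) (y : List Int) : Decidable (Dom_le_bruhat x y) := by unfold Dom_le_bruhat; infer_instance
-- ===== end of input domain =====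

-- B maintains the sorted prefixes incrementally (insert one element per step) instead of
-- re-slicing and re-sorting both prefixes at every step; return values agree on Pre_.

-- ===== PORT A =====
def le_indexed : List Int → List Int → Bool
  | a0 :: as_, b0 :: bs => if a0 > b0 then false else le_indexed as_ bs
  | _, _ => true

def le_bruhatGo (x y : List Int) : List Nat → Bool
  | [] => true
  | i :: rest =>
    let a := PySem.List.sorted (x.take (i + 1)) (fun v => v) false
    let b := PySem.List.sorted (y.take (i + 1)) (fun v => v) false
    if !(le_indexed a b) then false else le_bruhatGo x y rest

def le_bruhat (x : List Int) (y : List Int) : Bool :=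
  le_bruhatGo x y (List.range (x.length - 1))

-- ===== PORT B =====
def insortB : List Int → Int → List Int
  | [], v => [v]
  | h :: t, v => if h ≤ v then h :: insortB t v else v :: h :: t

def violate (a b : List Int) : Bool := (a.zip b).any (fun p => p.1 > p.2)

def le_bruhatAltGo : List Int → List Int → List Int → List Int → Bool
  | a, b, x0 :: x1 :: xt, y0 :: yt =>
    let a' := insortB a x0
    let b' := insortB b y0
    if violate a' b' then false else le_bruhatAltGo a' b' (x1 :: xt) yt
  | _, _, _, _ => true

def le_bruhat_alt (x : List Int) (y : List Int) : Bool :=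
  le_bruhatAltGo [] [] x y

-- ===== PRECONDITION & SPEC =====
-- Pre_ excludes inputs with len(y) < len(x) - 1: on those the Python A (and B alike) either
-- raises IndexError or returns False early depending on the data; the closed-form bound is
-- slightly narrower than the exact raise set, so it also excludes some inputs where both return False.
def Pre_le_bruhat (x : List Int) (y : List Int) : Prop := x.length ≤ y.length + 1
instance (x : List Int) (y : List Int) : Decidable (Pre_le_bruhat x y) := by unfold Pre_le_bruhat; infer_instance
def pvWitness_le_bruhat : List Int × List Int := ([1, 2], [2])

def Spec_le_bruhat (x : List Int) (y : List Int) (out : Bool) : Prop := out = le_bruhat_alt x y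
instance (x : List Int) (y : List Int) (out : Bool) : Decidable (Spec_le_bruhat x y out) := by unfold Spec_le_bruhat; infer_instance

-- ===== CLAIM (what is proved, stated in full; the proofs are below) =====
def Claim_equal_le_bruhat : Prop := ∀ (x : List Int) (y : List Int), Dom_le_bruhat x y → Pre_le_bruhat x y → Spec_le_bruhat x y (le_bruhat x y)

-- ===== LEMMAS AND PROOFS =====

theorem violate_eq_not_le_indexed : ∀ (a b : List Int), violate a b = !(le_indexed a b)
  | [], [] => by simp [violate, le_indexed]
  | [], _ :: _ => by simp [violate, le_indexed]
  | _ :: _, [] => by simp [violate, le_indexed]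
  | a0 :: as_, b0 :: bs => by
    have ih := violate_eq_not_le_indexed as_ bs
    simp [violate, le_indexed] at *
    by_cases h : b0 < a0 <;> simp [h, ih]

theorem insortB_perm : ∀ (l : List Int) (v : Int), (insortB l v).Perm (v :: l)
  | [], v => by simp [insortB]
  | h :: t, v => by
    by_cases hv : h ≤ v
    · simpa [insortB, hv] using ((insortB_perm t v).cons h).trans (List.Perm.swap v h t)
    · simp [insortB, hv]

theorem insortB_pairwise (l : List Int) (v : Int) (hl : l.Pairwise (· ≤ ·)) :
    (insortB l v).Pairwise (· ≤ ·) := by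
  induction l with
  | nil => simp [insortB]
  | cons h t ih =>
    rcases List.pairwise_cons.mp hl with ⟨hht, htp⟩
    by_cases hv : h ≤ v
    · rw [insortB, if_pos hv]
      refine List.pairwise_cons.mpr ⟨?_, ih htp⟩
      intro z hz
      have hz2 : z = v ∨ z ∈ t := by simpa using (insortB_perm t v).mem_iff.mp hz
      rcases hz2 with rfl | hz'
      · exact hv
      · exact hht z hz'
    · rw [insortB, if_neg hv]
      refine List.pairwise_cons.mpr ⟨?_, hl⟩
      intro z hz
      rcases List.mem_cons.mp hz with rfl | hz'
      · exact le_of_not_ge hv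
      · exact le_of_lt (lt_of_not_ge hv) |>.trans (hht z hz')

theorem foldl_insortB_perm : ∀ (l a : List Int), (l.foldl insortB a).Perm (a ++ l)
  | [], a => by simp
  | v :: l, a =>
    (foldl_insortB_perm l (insortB a v)).trans
      (((insortB_perm a v).append_right l).trans List.perm_middle.symm)

theorem foldl_insortB_pairwise : ∀ (l a : List Int), a.Pairwise (· ≤ ·) →
    (l.foldl insortB a).Pairwise (· ≤ ·)
  | [], _, h => h
  | v :: l, a, h => foldl_insortB_pairwise l (insortB a v) (insortB_pairwise a v h)

theorem foldl_insortB_eq_sorted (l : List Int) :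
    l.foldl insortB [] = PySem.List.sorted l (fun v => v) false := by
  exact Eq.symm (PySem.List.sorted_id_eq_of_perm_of_pairwise l (l.foldl insortB [])
    (by simpa using foldl_insortB_perm l []) (foldl_insortB_pairwise l [] (by simp)))

theorem le_bruhatGo_eq_all (x y : List Int) : ∀ (l : List Nat),
    le_bruhatGo x y l = l.all (fun i =>
      le_indexed (PySem.List.sorted (x.take (i + 1)) (fun v => v) false)
                 (PySem.List.sorted (y.take (i + 1)) (fun v => v) false))
  | [] => rfl
  | i :: rest => by
    have ih := le_bruhatGo_eq_all x y rest
    rw [List.all_cons, ← ih]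
    cases hli : le_indexed (PySem.List.sorted (x.take (i + 1)) (fun v => v) false)
                 (PySem.List.sorted (y.take (i + 1)) (fun v => v) false) with
    | false =>
      simp only [le_bruhatGo, hli, Bool.not_false, if_true, Bool.false_and]
    | true =>
      simp only [le_bruhatGo, hli, Bool.not_true, Bool.true_and]
      rw [if_neg Bool.false_ne_true]

theorem le_bruhatAltGo_eq_all : ∀ (xs ys a b : List Int), xs.length ≤ ys.length + 1 →
    le_bruhatAltGo a b xs ys = (List.range (xs.length - 1)).all (fun i =>
      !violate ((xs.take (i + 1)).foldl insortB a) ((ys.take (i + 1)).foldl insortB b))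
  | [], ys, a, b, _ => by simp [le_bruhatAltGo]
  | [_], ys, a, b, _ => by simp [le_bruhatAltGo]
  | x0 :: x1 :: xt, [], a, b, h => by simp at h
  | x0 :: x1 :: xt, y0 :: yt, a, b, h => by
    have ih := le_bruhatAltGo_eq_all (x1 :: xt) yt (insortB a x0) (insortB b y0)
      (by simp only [List.length_cons] at h ⊢; omega)
    simp only [List.length_cons, Nat.add_sub_cancel, List.take_succ_cons,
      List.foldl_cons] at ih ⊢
    rw [show le_bruhatAltGo a b (x0 :: x1 :: xt) (y0 :: yt) =
        (if violate (insortB a x0) (insortB b y0) = true then false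
         else le_bruhatAltGo (insortB a x0) (insortB b y0) (x1 :: xt) yt) from rfl]
    rw [List.range_succ_eq_map, List.all_cons, List.all_map]
    simp only [List.take_succ_cons, List.take_zero, List.foldl_cons, List.foldl_nil,
      Function.comp_def]
    cases hv : violate (insortB a x0) (insortB b y0) with
    | true => simp only [if_true, Bool.not_true, Bool.false_and]
    | false =>
      rw [if_neg Bool.false_ne_true]
      simp only [Bool.not_false, Bool.true_and]
      exact ih

-- ===== VERDICT (by name: the statement is the Claim_ definition above) =====
theorem le_bruhat_spec : Claim_equal_le_bruhat := by
  intro x y _ hpre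
  have hp : x.length ≤ y.length + 1 := hpre
  show le_bruhat x y = le_bruhat_alt x y
  unfold le_bruhat le_bruhat_alt
  rw [le_bruhatGo_eq_all x y (List.range (x.length - 1)), le_bruhatAltGo_eq_all x y [] [] hp]
  refine congrArg _ (funext fun i => ?_)
  rw [foldl_insortB_eq_sorted, foldl_insortB_eq_sorted, violate_eq_not_le_indexed, Bool.not_not]
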